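-- pv_equiv track=rewrite | github.com/dianachenyu/AlgorithmPractice | 2000-3000/2456. Most Popular Video Creator.py | mostPopularCreator
-- ===== SOURCE A (Python) =====
-- from typing import List
--
-- def mostPopularCreator(creators: List[str], ids: List[str], views: List[int]) -> List[List[str]]:
--     # {creator : [total, highest_view, id]}
--     count = dict()
--     for creator, id, view in zip(creators, ids, views):
--         if creator not in count:
--             count[creator] = [view, view, id]
--         else:
--             count[creator][0] += view
--             if view > count[creator][1] or (view == count[creator][1] and id < count[creator][2]):
--                 count[creator][1] = view
--                 count[creator][2] = id
--
--     max_total_view = max(count[creator][0] for creator in count)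
--     res = []
--     for creator, (total_view, max_view, id) in count.items():
--         if max_total_view == total_view:
--             res.append([creator, id])
--     return res
-- ===== SOURCE B (Python) =====
-- def mostPopularCreator(creators, ids, views):
--     groups = {}
--     for c, i, v in zip(creators, ids, views):
--         groups.setdefault(c, []).append((v, i))
--     totals = {c: sum(v for v, _ in recs) for c, recs in groups.items()}
--     best = max(totals.values())
--     return [[c, min(recs, key=lambda r: (-r[0], r[1]))[1]]
--             for c, recs in groups.items() if totals[c] == best]
-- ===== Notes on version B (the rewrite author's own statement) =====
-- stated objective: alternative
-- what changed: B first groups (view,id) records per creator in one pass, then computes each creator's total with sum and its best id with min(key=(-view,id)) in a second pass, instead of A's single fold that maintains a running (total, highest_view, best_id) triple per creator.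
import Mathlib
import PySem

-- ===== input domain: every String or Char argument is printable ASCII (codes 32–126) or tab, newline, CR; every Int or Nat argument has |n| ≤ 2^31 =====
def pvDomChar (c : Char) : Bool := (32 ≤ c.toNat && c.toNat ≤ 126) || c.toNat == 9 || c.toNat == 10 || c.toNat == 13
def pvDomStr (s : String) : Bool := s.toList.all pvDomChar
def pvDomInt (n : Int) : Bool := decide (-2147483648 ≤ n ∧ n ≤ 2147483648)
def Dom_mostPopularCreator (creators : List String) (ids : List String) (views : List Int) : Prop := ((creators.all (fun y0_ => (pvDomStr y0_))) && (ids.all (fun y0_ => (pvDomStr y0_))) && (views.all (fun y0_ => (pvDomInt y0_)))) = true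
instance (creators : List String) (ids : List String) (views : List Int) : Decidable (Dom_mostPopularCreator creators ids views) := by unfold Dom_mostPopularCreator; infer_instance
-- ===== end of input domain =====

-- B groups (view, id) records per creator first and only then computes totals and best ids
-- (sum / min with key (-view, id)); alternative decomposition, same asymptotic cost; return-value equivalence only.

-- ===== PORT A =====
-- the body of A's `for creator, id, view in zip(...)` loop; count maps creator ↦ (total, highest_view, id)
def pvLoopA (d : PySem.Dict String (Int × Int × String)) (t : String × String × Int) :
    PySem.Dict String (Int × Int × String) :=
  match d.get? t.1 with
  | none => d.insert t.1 (t.2.2, t.2.2, t.2.1)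
  | some w =>
      if decide (t.2.2 > w.2.1) || (decide (t.2.2 = w.2.1) && decide (t.2.1 < w.2.2)) then
        d.insert t.1 (w.1 + t.2.2, t.2.2, t.2.1)
      else
        d.insert t.1 (w.1 + t.2.2, w.2.1, w.2.2)

def mostPopularCreator (creators : List String) (ids : List String) (views : List Int) :
    List (List String) :=
  let count := (creators.zip (ids.zip views)).foldl pvLoopA PySem.Dict.empty
  match PySem.List.max? (count.values.map (·.1)) (fun x => x) with
  | none => []  -- Python's max() raises ValueError here; excluded by Pre_
  | some m =>
      count.items.foldl
        (fun res p => if decide (m = p.2.1) then res ++ [[p.1, p.2.2.2]] else res) []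

-- ===== PORT B =====
-- the body of B's grouping loop: groups.setdefault(c, []).append((v, i))
def pvLoopB (d : PySem.Dict String (List (Int × String))) (t : String × String × Int) :
    PySem.Dict String (List (Int × String)) :=
  d.modify t.1 [] (· ++ [(t.2.2, t.2.1)])

def mostPopularCreator_alt (creators : List String) (ids : List String) (views : List Int) :
    List (List String) :=
  let groups := (creators.zip (ids.zip views)).foldl pvLoopB PySem.Dict.empty
  let totals := PySem.Dict.ofList (groups.items.map (fun p => (p.1, (p.2.map (·.1)).sum)))
  match PySem.List.max? totals.values (fun x => x) with
  | none => []  -- Python's max() raises ValueError here; excluded by Pre_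
  | some best =>
      (groups.items.filter (fun p => totals.getD p.1 0 == best)).map
        (fun p => [p.1,
          match PySem.List.min2? p.2 (fun r => -r.1) (fun r => r.2) with
          | some r => r.2
          | none => ""])  -- unreachable: every group is nonempty

-- ===== PRECONDITION & SPEC =====
-- Pre_ excludes exactly the inputs where zip(...) is empty: there Python's max() raises ValueError (in both A and B).
def Pre_mostPopularCreator (creators : List String) (ids : List String) (views : List Int) : Prop :=
  creators ≠ [] ∧ ids ≠ [] ∧ views ≠ []
instance (creators : List String) (ids : List String) (views : List Int) : Decidable (Pre_mostPopularCreator creators ids views) := by unfold Pre_mostPopularCreator; infer_instance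

def pvWitness_mostPopularCreator : List String × List String × List Int := (["a", "b", "a"], ["x", "y", "z"], [5, 10, 5])

def Spec_mostPopularCreator (creators : List String) (ids : List String) (views : List Int) (out : List (List String)) : Prop := out = mostPopularCreator_alt creators ids views
instance (creators : List String) (ids : List String) (views : List Int) (out : List (List String)) : Decidable (Spec_mostPopularCreator creators ids views out) := by unfold Spec_mostPopularCreator; infer_instance

-- ===== CLAIM (what is proved, stated in full; the proofs are below) =====
def Claim_equal_mostPopularCreator : Prop := ∀ (creators : List String) (ids : List String) (views : List Int), Dom_mostPopularCreator creators ids views → Pre_mostPopularCreator creators ids views → Spec_mostPopularCreator creators ids views (mostPopularCreator creators ids views)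

-- ===== LEMMAS AND PROOFS =====

def pvStep (m x : Int × String) : Int × String :=
  if decide (x.1 > m.1) || (decide (x.1 = m.1) && decide (x.2 < m.2)) then x else m

def pvBest (recs : List (Int × String)) : Int × String :=
  match recs with
  | [] => (0, "")
  | r :: t => t.foldl pvStep r

theorem pvCond_eq (a b : Int) (c : Bool) :
    (decide (b < a) || (!decide (a < b) && c)) = (decide (a > b) || (decide (a = b) && c)) := by
  by_cases h1 : b < a <;> by_cases h2 : a < b <;> simp [h1, h2] <;> omega

theorem pvMin2_aux (f : Option (Int × String) → (Int × String) → Option (Int × String))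
    (hf : ∀ m x, f (some m) x = some (pvStep m x)) (t : List (Int × String)) (m : Int × String) :
    t.foldl f (some m) = some (t.foldl pvStep m) := by
  induction t generalizing m with
  | nil => rfl
  | cons x t ih => simp only [List.foldl_cons, hf]; exact ih (pvStep m x)

theorem pvMin2_eq (recs : List (Int × String)) (h : recs ≠ []) :
    PySem.List.min2? recs (fun r => -r.1) (fun r => r.2) = some (pvBest recs) := by
  match recs with
  | r :: t =>
      show List.foldl _ none (r :: t) = _
      simp only [List.foldl_cons]
      show List.foldl _ (some r) t = _
      rw [pvMin2_aux]
      · rfl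
      · intro m x
        have hc : (decide (-x.1 < -m.1) || (!decide (-m.1 < -x.1) && decide (x.2 < m.2)))
            = (decide (x.1 > m.1) || (decide (x.1 = m.1) && decide (x.2 < m.2))) := by
          have h1 : decide (-x.1 < -m.1) = decide (m.1 < x.1) := by rw [decide_eq_decide]; omega
          have h2 : decide (-m.1 < -x.1) = decide (x.1 < m.1) := by rw [decide_eq_decide]; omega
          rw [h1, h2, pvCond_eq]
        show (if (decide (-x.1 < -m.1) || (!decide (-m.1 < -x.1) && decide (x.2 < m.2))) = true
          then some x else some m) = some (pvStep m x)
        rw [hc]; unfold pvStep; split <;> rfl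

def pvAgg (recs : List (Int × String)) : Int × Int × String :=
  ((recs.map (·.1)).sum, (pvBest recs).1, (pvBest recs).2)

def pvMkAgg (g : PySem.Dict String (List (Int × String))) : PySem.Dict String (Int × Int × String) :=
  PySem.Dict.mk (g.items.map (fun p => (p.1, pvAgg p.2)))

theorem pvMkAgg_get?_aux (l : List (String × List (Int × String))) (c : String) :
    (PySem.Dict.mk (l.map (fun p => (p.1, pvAgg p.2)))).get? c
      = ((PySem.Dict.mk l).get? c).map pvAgg := by
  induction l with
  | nil => rfl
  | cons p l ih =>
      obtain ⟨k, v⟩ := p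
      simp only [List.map_cons, PySem.Dict.get?_mk_cons, ih]
      split <;> rfl

theorem pvMkAgg_get? (g : PySem.Dict String (List (Int × String))) (c : String) :
    (pvMkAgg g).get? c = (g.get? c).map pvAgg :=
  pvMkAgg_get?_aux g.items c

theorem pvMkAgg_contains (g : PySem.Dict String (List (Int × String))) (c : String) :
    (pvMkAgg g).contains c = g.contains c := by
  rw [PySem.Dict.contains_eq_isSome_get?, PySem.Dict.contains_eq_isSome_get?, pvMkAgg_get?]
  exact Option.isSome_map ..

theorem pvAgg_append (recs : List (Int × String)) (h : recs ≠ []) (v : Int) (i : String) :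
    pvAgg (recs ++ [(v, i)]) = ((pvAgg recs).1 + v, pvStep (pvBest recs) (v, i)) := by
  match recs with
  | r :: t => simp [pvAgg, pvBest, List.foldl_append]; ring

theorem pvStep_eq (g : PySem.Dict String (List (Int × String))) (t : String × String × Int)
    (hne : ∀ p ∈ g.items, p.2 ≠ []) :
    pvLoopA (pvMkAgg g) t = pvMkAgg (pvLoopB g t) := by
  obtain ⟨c, i, v⟩ := t
  unfold pvLoopA pvLoopB
  rw [pvMkAgg_get?]
  rcases h : g.get? c with _ | recs
  · have hcon : g.contains c = false := by
      rw [PySem.Dict.contains_eq_isSome_get?, h]; rfl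
    have hgd : g.getD c [] = [] := PySem.Dict.getD_of_get?_eq_none g [] h
    simp only [Option.map_none]
    show (pvMkAgg g).insert c (v, v, i) = pvMkAgg (g.modify c [] (· ++ [(v, i)]))
    rw [PySem.Dict.modify, hgd]
    show _ = pvMkAgg (g.insert c [(v, i)])
    simp only [PySem.Dict.insert, pvMkAgg_contains, hcon]
    simp [pvMkAgg, pvAgg, pvBest]
  · have hcon : g.contains c = true := by
      rw [PySem.Dict.contains_eq_isSome_get?, h]; rfl
    have hconM : (pvMkAgg g).contains c = true := by rw [pvMkAgg_contains]; exact hcon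
    have hrec : recs ≠ [] := hne _ (PySem.Dict.mem_items_of_get?_eq_some g h)
    simp only [Option.map_some]
    rw [PySem.Dict.modify, PySem.Dict.getD_of_get?_eq_some g [] h]
    have hrhs : pvMkAgg (g.insert c (recs ++ [(v, i)]))
        = (pvMkAgg g).insert c (pvAgg (recs ++ [(v, i)])) := by
      apply PySem.Dict.ext
      have h1 : (pvMkAgg (g.insert c (recs ++ [(v, i)]))).items
          = (g.insert c (recs ++ [(v, i)])).items.map (fun p => (p.1, pvAgg p.2)) := rfl
      have h2 : (pvMkAgg g).items = g.items.map (fun p => (p.1, pvAgg p.2)) := rfl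
      rw [h1, PySem.Dict.items_insert_of_contains g _ hcon,
          PySem.Dict.items_insert_of_contains _ _ hconM, h2]
      simp only [List.map_map]
      apply List.map_congr_left
      intro p _
      by_cases hp : p.1 = c <;> simp [hp]
    rw [hrhs, pvAgg_append recs hrec v i]
    simp only [pvAgg, pvStep]
    split <;> simp_all
    rename_i hcnd
    rw [if_neg]
    rintro (hlt | ⟨he, hlt⟩)
    · exact absurd hlt (not_lt.mpr hcnd.1)
    · exact absurd hlt (not_lt.mpr (hcnd.2 he))

theorem pvNe_pres (l : List (String × String × Int)) (g : PySem.Dict String (List (Int × String)))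
    (hne : ∀ p ∈ g.items, p.2 ≠ []) :
    ∀ p ∈ (l.foldl pvLoopB g).items, p.2 ≠ [] := by
  induction l generalizing g with
  | nil => exact hne
  | cons t l ih =>
      simp only [List.foldl_cons]
      apply ih
      intro p hp
      unfold pvLoopB at hp
      rw [PySem.Dict.modify] at hp
      rcases (PySem.Dict.mem_items_insert _ _ _ p).mp hp with h1 | ⟨h2, _⟩
      · rw [h1]; simp
      · exact hne p h2

theorem pvInv (l : List (String × String × Int)) (g : PySem.Dict String (List (Int × String)))
    (hne : ∀ p ∈ g.items, p.2 ≠ []) :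
    l.foldl pvLoopA (pvMkAgg g) = pvMkAgg (l.foldl pvLoopB g) := by
  induction l generalizing g with
  | nil => rfl
  | cons t l ih =>
      simp only [List.foldl_cons, pvStep_eq g t hne]
      exact ih (pvLoopB g t) (pvNe_pres [t] g hne)

theorem pvTotals_items (G : PySem.Dict String (List (Int × String))) (hnd : G.keys.Nodup) :
    (PySem.Dict.ofList (G.items.map (fun p => (p.1, (p.2.map (·.1)).sum)))).items
      = G.items.map (fun p => (p.1, (p.2.map (·.1)).sum)) := by
  unfold PySem.Dict.ofList PySem.Dict.update
  have hf := PySem.Dict.items_foldl_insert_fresh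
      (G.items.map (fun p => (p.1, (p.2.map (·.1)).sum)))
      (fun a => a.1) (fun a => a.2) PySem.Dict.empty
      (by intro a _; simp) (by simpa [List.map_map] using hnd)
  simpa using hf

theorem pvFinal (G : PySem.Dict String (List (Int × String))) (hnd : G.keys.Nodup)
    (hne : ∀ p ∈ G.items, p.2 ≠ []) :
    (match PySem.List.max? (((pvMkAgg G).values).map (·.1)) (fun x => x) with
     | none => []
     | some m => (pvMkAgg G).items.foldl
        (fun (res : List (List String)) (p : String × (Int × Int × String)) =>
          if decide (m = p.2.1) then res ++ [[p.1, p.2.2.2]] else res) [])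
    = (match PySem.List.max? (PySem.Dict.ofList (G.items.map (fun p => (p.1, (p.2.map (·.1)).sum)))).values (fun x => x) with
       | none => []
       | some best =>
          (G.items.filter (fun p : String × List (Int × String) =>
            (PySem.Dict.ofList (G.items.map (fun p => (p.1, (p.2.map (·.1)).sum)))).getD p.1 0 == best)).map
            (fun p : String × List (Int × String) => [p.1,
              match PySem.List.min2? p.2 (fun r : Int × String => -r.1) (fun r : Int × String => r.2) with
              | some r => r.2
              | none => ""])) := by
  have htot := pvTotals_items G hnd
  have hndT : (PySem.Dict.ofList (G.items.map (fun p => (p.1, (p.2.map (·.1)).sum)))).keys.Nodup := by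
    show (List.map _ _).Nodup
    rw [htot]
    simpa [List.map_map] using hnd
  have hvals : ((pvMkAgg G).values).map (·.1)
      = (PySem.Dict.ofList (G.items.map (fun p => (p.1, (p.2.map (·.1)).sum)))).values := by
    show (((pvMkAgg G).items.map (fun q : String × (Int × Int × String) => q.2)).map
        (fun w : Int × Int × String => w.1))
      = List.map (fun q : String × Int => q.2)
        ((PySem.Dict.ofList (G.items.map (fun p => (p.1, (p.2.map (·.1)).sum)))).items)
    rw [htot]
    simp only [pvMkAgg, List.map_map]
    rfl
  rw [hvals]
  rcases hmax : PySem.List.max? (PySem.Dict.ofList (G.items.map (fun p => (p.1, (p.2.map (·.1)).sum)))).values (fun x => x) with _ | m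
  · rw [hmax]
  · rw [hmax]
    show ((pvMkAgg G).items).foldl _ [] = _
    rw [PySem.List.foldl_append_if (fun p : String × (Int × Int × String) => decide (m = p.2.1)) (fun p : String × (Int × Int × String) => [p.1, p.2.2.2]) ((pvMkAgg G).items) []]
    show List.map _ (List.filter _ (G.items.map (fun p : String × List (Int × String) => (p.1, pvAgg p.2)))) = _
    rw [List.filter_map, List.map_map]
    have hfil : G.items.filter ((fun p : String × (Int × Int × String) => decide (m = p.2.1)) ∘ (fun p : String × List (Int × String) => (p.1, pvAgg p.2)))
        = G.items.filter (fun p =>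
            (PySem.Dict.ofList (G.items.map (fun q => (q.1, (q.2.map (·.1)).sum)))).getD p.1 0 == m) := by
      apply List.filter_congr
      intro p hp
      have hmem : (p.1, (p.2.map (·.1)).sum) ∈ (PySem.Dict.ofList (G.items.map (fun q => (q.1, (q.2.map (·.1)).sum)))).items := by
        rw [htot]
        exact List.mem_map.mpr ⟨p, hp, rfl⟩
      rw [PySem.Dict.getD_of_mem_items _ hmem hndT 0]
      show decide (m = (pvAgg p.2).1) = _
      show decide (m = (p.2.map (·.1)).sum) = ((p.2.map (·.1)).sum == m)
      by_cases hh : (p.2.map (·.1)).sum = m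
      · simp [hh]
      · have h2 : ¬ (m = (p.2.map (·.1)).sum) := fun h => hh h.symm
        simp [hh, h2]
    rw [hfil]
    apply List.map_congr_left
    intro p hp
    have hpG : p ∈ G.items := List.mem_of_mem_filter hp
    have hmin := pvMin2_eq p.2 (hne p hpG)
    simp only [Function.comp]
    rw [hmin]
    rfl

-- ===== VERDICT (by name: the statement is the Claim_ definition above) =====
theorem mostPopularCreator_spec : Claim_equal_mostPopularCreator := by
  unfold Claim_equal_mostPopularCreator
  intro creators ids views _ _
  unfold Spec_mostPopularCreator mostPopularCreator mostPopularCreator_alt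
  have hemp : ∀ p ∈ (PySem.Dict.empty : PySem.Dict String (List (Int × String))).items, p.2 ≠ [] := by
    intro p hp; cases hp
  have hG : (creators.zip (ids.zip views)).foldl pvLoopA PySem.Dict.empty
      = pvMkAgg ((creators.zip (ids.zip views)).foldl pvLoopB PySem.Dict.empty) :=
    pvInv (creators.zip (ids.zip views)) PySem.Dict.empty hemp
  have hnd : ((creators.zip (ids.zip views)).foldl pvLoopB PySem.Dict.empty).keys.Nodup :=
    PySem.Dict.nodup_keys_foldl_modify_key (creators.zip (ids.zip views))
      (fun t => t.1) [] (fun _ t => (fun v => v ++ [(t.2.2, t.2.1)])) PySem.Dict.empty (by simp)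
  have hne := pvNe_pres (creators.zip (ids.zip views)) PySem.Dict.empty hemp
  show (match PySem.List.max? (((creators.zip (ids.zip views)).foldl pvLoopA PySem.Dict.empty).values.map (·.1)) (fun x => x) with
    | none => []
    | some m => ((creators.zip (ids.zip views)).foldl pvLoopA PySem.Dict.empty).items.foldl
        (fun (res : List (List String)) (p : String × (Int × Int × String)) => if decide (m = p.2.1) then res ++ [[p.1, p.2.2.2]] else res) []) = _
  rw [hG]
  exact pvFinal _ hnd hne
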